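-- pv_equiv track=rewrite | github.com/HwangChulHee/nietzche-sllm-project | ml/v2_pipeline/english_chunker_gs.py | find_book_boundaries
-- ===== SOURCE A (Python) =====
-- BOOK_MARKERS = [
--     ("BOOK FIRST", 1),
--     ("BOOK SECOND", 2),
--     ("BOOK THIRD", 3),
--     ("BOOK FOURTH", 4),
--     ("BOOK FIFTH", 5),
-- ]
--
-- END_MARKER = "APPENDIX"  # 본편 종료 신호
--
-- def find_book_boundaries(lines):
--     """BOOK 마커 위치 찾기. 반환: [(book_num, start_line), ...] + 종료 line."""
--     boundaries = []
--     end_line = len(lines)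
--     for i, line in enumerate(lines):
--         stripped = line.strip()
--         for marker, num in BOOK_MARKERS:
--             if stripped == marker:
--                 boundaries.append((num, i))
--         if stripped == END_MARKER:
--             end_line = i
--             break
--     return boundaries, end_line
-- ===== SOURCE B (Python) =====
-- BOOK_MARKERS = [
--     ("BOOK FIRST", 1),
--     ("BOOK SECOND", 2),
--     ("BOOK THIRD", 3),
--     ("BOOK FOURTH", 4),
--     ("BOOK FIFTH", 5),
-- ]
--
-- END_MARKER = "APPENDIX"
--
--
-- def find_book_boundaries(lines):
--     """Two separate passes: first locate the end line, then collect markers in the prefix."""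
--     end_line = next((i for i, line in enumerate(lines)
--                      if line.strip() == END_MARKER), len(lines))
--     boundaries = [(num, i)
--                   for i, line in enumerate(lines[:end_line])
--                   for marker, num in BOOK_MARKERS
--                   if line.strip() == marker]
--     return boundaries, end_line
-- ===== Notes on version B (the rewrite author's own statement) =====
-- stated objective: alternative
-- what changed: Replaced the single enumerate loop with an early break and in-loop appends by two independent passes: one scan that computes end_line (first line stripping to APPENDIX, default len(lines)), then a flat comprehension over the sliced prefix lines[:end_line] that collects (num, i) for matching BOOK markers.
import Mathlib
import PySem

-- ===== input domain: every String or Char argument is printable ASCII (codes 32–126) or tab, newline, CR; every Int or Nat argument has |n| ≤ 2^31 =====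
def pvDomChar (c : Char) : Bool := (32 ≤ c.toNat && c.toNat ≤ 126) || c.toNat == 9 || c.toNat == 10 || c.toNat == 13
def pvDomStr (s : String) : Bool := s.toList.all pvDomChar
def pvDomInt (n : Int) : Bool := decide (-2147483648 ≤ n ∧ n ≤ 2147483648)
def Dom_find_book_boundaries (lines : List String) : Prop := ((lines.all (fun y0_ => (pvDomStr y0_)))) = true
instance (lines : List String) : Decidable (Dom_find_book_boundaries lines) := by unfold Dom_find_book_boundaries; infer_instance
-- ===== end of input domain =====

-- B restructures A's single pass-with-break into two independent passes (find end_line, then collect markers over the prefix); same cost, alternative decomposition.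

def BOOK_MARKERS : List (String × Int) :=
  [("BOOK FIRST", 1), ("BOOK SECOND", 2), ("BOOK THIRD", 3), ("BOOK FOURTH", 4), ("BOOK FIFTH", 5)]

def END_MARKER : String := "APPENDIX"

-- ===== PORT A =====
-- the for-loop over enumerate(lines) with break: state (acc, end_line)
def fbbLoop : List String → Int → List (Int × Int) → Int → (List (Int × Int)) × Int
  | [], _, acc, endl => (acc, endl)
  | line :: rest, i, acc, endl =>
    let stripped := PySem.Str.strip line
    let acc' := BOOK_MARKERS.foldl (fun a p => if stripped = p.1 then a ++ [(p.2, i)] else a) acc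
    if stripped = END_MARKER then (acc', i)
    else fbbLoop rest (i + 1) acc' endl

def find_book_boundaries (lines : List String) : (List (Int × Int)) × Int :=
  fbbLoop lines 0 [] (lines.length : Int)

-- ===== PORT B =====
-- pass 1: next((i for i, line in enumerate(lines) if line.strip() == END_MARKER), len(lines))
def fbbEnd : List String → Int → Int
  | [], i => i
  | line :: rest, i => if PySem.Str.strip line = END_MARKER then i else fbbEnd rest (i + 1)

-- pass 2: the flat comprehension over enumerate(lines[:end_line])
def fbbBounds (xs : List String) : List (Int × Int) :=
  (PySem.List.enumerate xs 0).flatMap (fun p =>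
    BOOK_MARKERS.filterMap (fun m => if PySem.Str.strip p.2 = m.1 then some (m.2, p.1) else none))

def find_book_boundaries_alt (lines : List String) : (List (Int × Int)) × Int :=
  let end_line := fbbEnd lines 0
  (fbbBounds (PySem.List.slice lines none (some end_line)), end_line)

-- ===== PRECONDITION & SPEC =====
def Spec_find_book_boundaries (lines : List String) (out : (List (Int × Int)) × Int) : Prop := out = find_book_boundaries_alt lines
instance (lines : List String) (out : (List (Int × Int)) × Int) : Decidable (Spec_find_book_boundaries lines out) := by unfold Spec_find_book_boundaries; infer_instance

-- ===== CLAIM (what is proved, stated in full; the proofs are below) =====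
def Claim_equal_find_book_boundaries : Prop := ∀ (lines : List String), Dom_find_book_boundaries lines → Spec_find_book_boundaries lines (find_book_boundaries lines)

-- ===== LEMMAS AND PROOFS =====

-- proof helpers: marker hits of one stripped line, the combined boundary list, length of the kept prefix
def fbbMarks (s : String) (i : Int) : List (Int × Int) :=
  BOOK_MARKERS.filterMap (fun m => if s = m.1 then some (m.2, i) else none)

def fbbBnds : List String → Int → List (Int × Int)
  | [], _ => []
  | l :: t, i =>
    if PySem.Str.strip l = END_MARKER then []
    else fbbMarks (PySem.Str.strip l) i ++ fbbBnds t (i + 1)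

def fbbCut : List String → Nat
  | [] => 0
  | l :: t => if PySem.Str.strip l = END_MARKER then 0 else fbbCut t + 1

lemma foldl_marks (s : String) (i : Int) (acc : List (Int × Int)) :
    BOOK_MARKERS.foldl (fun a p => if s = p.1 then a ++ [(p.2, i)] else a) acc
      = acc ++ fbbMarks s i := by
  simp only [BOOK_MARKERS, fbbMarks, List.foldl, List.filterMap]
  split_ifs <;> simp

lemma marks_end (i : Int) : fbbMarks END_MARKER i = [] := by
  simp [fbbMarks, BOOK_MARKERS, END_MARKER]

lemma fbbEnd_eq (ls : List String) : ∀ i : Int, fbbEnd ls i = i + fbbCut ls := by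
  induction ls with
  | nil => intro i; simp [fbbEnd, fbbCut]
  | cons l t ih =>
    intro i
    simp only [fbbEnd, fbbCut]
    split_ifs with h
    · simp
    · rw [ih]; push_cast; ring

lemma fbbCut_of_no_end (ls : List String)
    (h : ∀ l ∈ ls, ¬ PySem.Str.strip l = END_MARKER) : fbbCut ls = ls.length := by
  induction ls with
  | nil => rfl
  | cons l t ih =>
    simp only [fbbCut, if_neg (h l (List.mem_cons_self))]
    simp [ih (fun x hx => h x (List.mem_cons_of_mem _ hx))]

lemma fbbLoop_eq (ls : List String) : ∀ (i : Int) (acc : List (Int × Int)) (endl : Int),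
    fbbLoop ls i acc endl
      = (acc ++ fbbBnds ls i,
         if ∀ l ∈ ls, ¬ PySem.Str.strip l = END_MARKER then endl else i + fbbCut ls) := by
  induction ls with
  | nil => intro i acc endl; simp [fbbLoop, fbbBnds]
  | cons l t ih =>
    intro i acc endl
    simp only [fbbLoop, foldl_marks]
    by_cases h : PySem.Str.strip l = END_MARKER
    · rw [if_pos h, h, marks_end]
      have hc : ¬ (∀ x ∈ l :: t, ¬ PySem.Str.strip x = END_MARKER) := by
        intro hc; exact hc l List.mem_cons_self h
      simp only [fbbBnds, fbbCut, if_pos h, if_neg hc]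
      simp
    · rw [if_neg h, ih]
      simp only [fbbBnds, fbbCut, Prod.mk.injEq, List.append_assoc,
        List.forall_mem_cons, h, not_false_iff, true_and]
      refine ⟨rfl, ?_⟩
      split_ifs <;> first | rfl | exact (by assumption : False).elim | (push_cast; ring)

lemma bounds_take (ls : List String) : ∀ i : Int,
    (PySem.List.enumerate (ls.take (fbbCut ls)) i).flatMap (fun p =>
      BOOK_MARKERS.filterMap (fun m => if PySem.Str.strip p.2 = m.1 then some (m.2, p.1) else none))
      = fbbBnds ls i := by
  induction ls with
  | nil => intro i; simp [fbbBnds, PySem.List.enumerate_nil]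
  | cons l t ih =>
    intro i
    simp only [fbbBnds, fbbCut]
    split_ifs with h
    · simp [PySem.List.enumerate_nil]
    · simp only [List.take_succ_cons, PySem.List.enumerate_cons, List.flatMap_cons, ih]
      rfl

-- ===== VERDICT (by name: the statement is the Claim_ definition above) =====
theorem find_book_boundaries_spec : Claim_equal_find_book_boundaries := by
  intro lines _
  unfold Spec_find_book_boundaries find_book_boundaries find_book_boundaries_alt fbbBounds
  rw [fbbLoop_eq, fbbEnd_eq]
  simp only [zero_add, List.nil_append, PySem.List.slice_to_natCast, bounds_take,
    Prod.mk.injEq, true_and]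
  split_ifs with h
  · rw [fbbCut_of_no_end lines h]
  · rfl
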